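-- pv_equiv track=rewrite | github.com/choplet/choplet | task_03_02.py | dec2hex
-- ===== SOURCE A (Python) =====
-- def dec2hex(l):
--     d = {0:'0', 1:'1', 2:'2', 3:'3', 4:'4', 5:'5', 6:'6', 7:'7', 8:'8', 9:'9',
--          10:'A', 11:'B', 12:'C', 13:'D', 14:'E', 15:'F'}
--     q = l
--     result = ""
--     while q != 0:
--         r = q % 16
--         q = q // 16
--         result += d[r]
--     return (result)
-- ===== SOURCE B (Python) =====
-- def dec2hex(l):
--     d = {0:'0', 1:'1', 2:'2', 3:'3', 4:'4', 5:'5', 6:'6', 7:'7', 8:'8', 9:'9',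
--          10:'A', 11:'B', 12:'C', 13:'D', 14:'E', 15:'F'}
--     if l == 0:
--         return ""
--     return d[l % 16] + dec2hex(l // 16)
-- ===== Notes on version B (the rewrite author's own statement) =====
-- stated objective: simpler
-- what changed: Iterative while-loop with a string accumulator replaced by direct structural recursion that prepends the least-significant digit and recurses on l // 16; Pre_ excludes l < 0, where A's loop never terminates.
import Mathlib
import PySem

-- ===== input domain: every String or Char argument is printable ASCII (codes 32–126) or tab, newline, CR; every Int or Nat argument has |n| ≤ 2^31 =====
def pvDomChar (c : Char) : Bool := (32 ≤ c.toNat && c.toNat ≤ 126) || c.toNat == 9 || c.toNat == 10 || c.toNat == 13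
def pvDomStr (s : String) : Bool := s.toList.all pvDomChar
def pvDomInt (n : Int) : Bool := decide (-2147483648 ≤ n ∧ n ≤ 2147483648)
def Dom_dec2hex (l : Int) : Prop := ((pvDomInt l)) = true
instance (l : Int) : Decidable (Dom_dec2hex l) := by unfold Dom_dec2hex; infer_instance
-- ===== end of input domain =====

-- B replaces A's while-loop-with-accumulator by direct recursion on l // 16 (objective: simpler).

-- shared digit map: the literal dict d of both Pythons, as a lookup function (keys 0..15)
def pvHexDigit (r : Int) : String :=
  if r = 0 then "0" else if r = 1 then "1" else if r = 2 then "2" else if r = 3 then "3"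
  else if r = 4 then "4" else if r = 5 then "5" else if r = 6 then "6" else if r = 7 then "7"
  else if r = 8 then "8" else if r = 9 then "9" else if r = 10 then "A" else if r = 11 then "B"
  else if r = 12 then "C" else if r = 13 then "D" else if r = 14 then "E" else "F"

-- ===== PORT A =====
-- the while-loop: while q != 0: r = q % 16; q = q // 16; result += d[r]
-- (for q < 0 Python loops forever; the 'q < 0' guard only makes the Lean function total there)
def dec2hexLoop (q : Int) (result : String) : String :=
  if q = 0 then result
  else if q < 0 then result
  else dec2hexLoop (PySem.Int.floordiv q 16) (result ++ pvHexDigit (PySem.Int.mod q 16))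
termination_by q.toNat
decreasing_by
  rw [PySem.Int.floordiv_eq_ediv_of_pos (by omega : (0:Int) < 16)]
  omega

def dec2hex (l : Int) : String := dec2hexLoop l ""

-- ===== PORT B =====
-- recursion: "" for 0, else d[l % 16] + dec2hex(l // 16)
-- (for l < 0 Python hits RecursionError; the 'l < 0' guard only makes the Lean function total there)
def dec2hex_alt (l : Int) : String :=
  if l = 0 then ""
  else if l < 0 then ""
  else pvHexDigit (PySem.Int.mod l 16) ++ dec2hex_alt (PySem.Int.floordiv l 16)
termination_by l.toNat
decreasing_by
  rw [PySem.Int.floordiv_eq_ediv_of_pos (by omega : (0:Int) < 16)]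
  omega

-- ===== PRECONDITION & SPEC =====
-- Pre_ excludes l < 0: there A's while loop never terminates (q stays -1), so A returns on exactly 0 ≤ l.
def Pre_dec2hex (l : Int) : Prop := 0 ≤ l
instance (l : Int) : Decidable (Pre_dec2hex l) := by unfold Pre_dec2hex; infer_instance
def pvWitness_dec2hex : Int := (255)

def Spec_dec2hex (l : Int) (out : String) : Prop := out = dec2hex_alt l
instance (l : Int) (out : String) : Decidable (Spec_dec2hex l out) := by unfold Spec_dec2hex; infer_instance

-- ===== CLAIM (what is proved, stated in full; the proofs are below) =====
def Claim_equal_dec2hex : Prop := ∀ (l : Int), Dom_dec2hex l → Pre_dec2hex l → Spec_dec2hex l (dec2hex l)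

-- ===== LEMMAS AND PROOFS =====

-- loop invariant: for 0 ≤ q the accumulator loop produces s ++ (B's recursion on q)
theorem dec2hexLoop_eq (n : Nat) : ∀ (q : Int), q.toNat = n → 0 ≤ q →
    ∀ (s : String), dec2hexLoop q s = s ++ dec2hex_alt q := by
  induction n using Nat.strong_induction_on with
  | _ n ih =>
    intro q hn hq s
    rw [dec2hexLoop, dec2hex_alt]
    by_cases h0 : q = 0
    · simp [h0]
    · have hpos : 0 < q := by omega
      rw [if_neg h0, if_neg (by omega : ¬ q < 0), if_neg h0, if_neg (by omega : ¬ q < 0)]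
      have hdiv : PySem.Int.floordiv q 16 = q / 16 :=
        PySem.Int.floordiv_eq_ediv_of_pos (by omega)
      rw [hdiv, ih (q / 16).toNat (by omega) (q / 16) rfl (by omega),
        String.append_assoc]

-- ===== VERDICT (by name: the statement is the Claim_ definition above) =====
theorem dec2hex_spec : Claim_equal_dec2hex := by
  intro l _ hpre
  unfold Spec_dec2hex dec2hex
  have := dec2hexLoop_eq l.toNat l rfl hpre ""
  simpa using this
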